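-- pv_equiv track=rewrite | github.com/EfazAhmed/CodeSignal-Arcade | The Core/4_loop_tunnel/31_increase_number_roundness.py | solution
-- ===== SOURCE A (Python) =====
-- def solution(n):
--     rev = str(n)[::-1]
--     first = -1
--
--     for i, letter in enumerate(rev):
--         if letter != "0":
--             first = i
--             rev = rev[first+1:]
--             break
--
--     if first == -1:
--         return False
--
--     second = -1
--     for i, letter in enumerate(rev):
--         if letter == "0":
--             second = i
--             break
--     if second == -1:
--         return False
--     else:
--         return True
-- ===== SOURCE B (Python) =====
-- def solution(n):
--     m = abs(n)
--     while m % 10 == 0 and m != 0: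
--         m //= 10
--     while m > 0:
--         if m % 10 == 0:
--             return True
--         m //= 10
--     return False
-- ===== Notes on version B (the rewrite author's own statement) =====
-- stated objective: alternative
-- what changed: A reverses str(n) and scans characters with slicing to find a zero after the first non-zero; B never builds a string: it strips trailing zeros of abs(n) with integer division and then scans the remaining digits with % 10 for a zero.
import Mathlib
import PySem

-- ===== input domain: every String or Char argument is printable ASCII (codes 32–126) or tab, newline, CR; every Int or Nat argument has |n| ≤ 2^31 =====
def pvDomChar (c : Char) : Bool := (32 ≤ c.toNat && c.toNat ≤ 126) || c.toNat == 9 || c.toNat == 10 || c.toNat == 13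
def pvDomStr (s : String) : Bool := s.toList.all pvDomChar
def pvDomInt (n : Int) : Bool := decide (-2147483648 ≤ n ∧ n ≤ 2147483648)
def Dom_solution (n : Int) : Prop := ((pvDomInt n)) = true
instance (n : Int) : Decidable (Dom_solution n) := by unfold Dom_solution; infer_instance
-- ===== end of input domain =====

-- B replaces A's reversed-string scanning by integer digit arithmetic (strip trailing zeros, then
-- look for a zero digit); same return value, a different decomposition (objective: alternative).


-- ===== PORT A =====
-- A's first loop: index of the first character ≠ '0' (Python's `first`, -1 if none)
def pvFindNonZero : List Char → Int → Int
  | [], _ => -1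
  | c :: cs, i => if c ≠ '0' then i else pvFindNonZero cs (i + 1)

-- A's second loop: index of the first character = '0' (Python's `second`, -1 if none)
def pvFindZero : List Char → Int → Int
  | [], _ => -1
  | c :: cs, i => if c = '0' then i else pvFindZero cs (i + 1)

-- body of A after `rev = str(n)[::-1]` has been computed
def pvScan (rev : List Char) : Bool :=
  let first := pvFindNonZero rev 0
  if first = -1 then false
  else
    let rev2 := PySem.List.slice rev (some (first + 1)) none
    if pvFindZero rev2 0 = -1 then false else true

def solution (n : Int) : Bool :=
  match PySem.Str.slice? (PySem.Int.toStr n) none none (-1) with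
  | none => false  -- unreachable: the step of str(n)[::-1] is -1 ≠ 0
  | some revS => pvScan revS.toList

-- ===== PORT B =====
-- B's first loop: `while m % 10 == 0 and m != 0: m //= 10`  (m = abs(n) ≥ 0, kept as Nat)
def pvStrip (m : Nat) : Nat :=
  if h : m % 10 = 0 ∧ m ≠ 0 then pvStrip (m / 10) else m
decreasing_by exact Nat.div_lt_self (Nat.pos_of_ne_zero h.2) (by omega)

-- B's second loop: `while m > 0: if m % 10 == 0: return True; m //= 10` then `return False`
def pvHasZero (m : Nat) : Bool :=
  if h : 0 < m then (if m % 10 = 0 then true else pvHasZero (m / 10)) else false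
decreasing_by exact Nat.div_lt_self h (by omega)

def solution_alt (n : Int) : Bool := pvHasZero (pvStrip n.natAbs)

-- ===== PRECONDITION & SPEC =====
def Spec_solution (n : Int) (out : Bool) : Prop := out = solution_alt n
instance (n : Int) (out : Bool) : Decidable (Spec_solution n out) := by unfold Spec_solution; infer_instance

-- ===== CLAIM (what is proved, stated in full; the proofs are below) =====
def Claim_equal_solution : Prop := ∀ (n : Int), Dom_solution n → Spec_solution n (solution n)

-- ===== LEMMAS AND PROOFS =====

theorem digitChar_eq_zero_iff (d : Nat) : Nat.digitChar d = '0' ↔ d = 0 := by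
  by_cases h : d < 16
  · interval_cases d <;> decide
  · have hs : Nat.digitChar d = '*' := by
      unfold Nat.digitChar
      rw [if_neg (by omega), if_neg (by omega), if_neg (by omega), if_neg (by omega),
          if_neg (by omega), if_neg (by omega), if_neg (by omega), if_neg (by omega),
          if_neg (by omega), if_neg (by omega), if_neg (by omega), if_neg (by omega),
          if_neg (by omega), if_neg (by omega), if_neg (by omega), if_neg (by omega)]
    rw [hs]
    simp only [Char.reduceEq, false_iff]
    omega

theorem comp_digitChar_eq :
    ((fun c => c == '0') ∘ Nat.digitChar) = (fun d : Nat => d == 0) := by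
  funext d
  by_cases hd : d = 0
  · subst hd; rfl
  · have h1 : Nat.digitChar d ≠ '0' := fun h => hd ((digitChar_eq_zero_iff d).mp h)
    simp [Function.comp, h1, hd]

theorem toDigitsCore_eq_digits (n : Nat) (f : Nat) (l : List Char) (h0 : 0 < n) (hf : n ≤ f) :
    Nat.toDigitsCore 10 f n l = ((Nat.digits 10 n).map Nat.digitChar).reverse ++ l := by
  induction n using Nat.strong_induction_on generalizing f l with
  | _ n ih =>
    obtain ⟨f, rfl⟩ : ∃ f', f = f' + 1 := ⟨f - 1, by omega⟩
    have step : Nat.toDigitsCore 10 (f + 1) n l =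
        (if n / 10 = 0 then Nat.digitChar (n % 10) :: l
         else Nat.toDigitsCore 10 f (n / 10) (Nat.digitChar (n % 10) :: l)) := rfl
    rw [step, Nat.digits_def' (by omega : (1:Nat) < 10) h0]
    by_cases hq : n / 10 = 0
    · rw [if_pos hq, hq]; simp
    · rw [if_neg hq,
        ih (n / 10) (Nat.div_lt_self h0 (by omega)) f (Nat.digitChar (n % 10) :: l)
          (Nat.pos_of_ne_zero hq) (by omega)]
      simp

theorem toDigits_eq_digits (n : Nat) (h : 0 < n) :
    Nat.toDigits 10 n = ((Nat.digits 10 n).map Nat.digitChar).reverse := by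
  simpa using toDigitsCore_eq_digits n (n + 1) [] h (by omega)

theorem pvFindNonZero_eq (l : List Char) (i : Nat) :
    pvFindNonZero l (i : Int) =
      if l.all (· == '0') then -1
      else ((i + (l.takeWhile (· == '0')).length : Nat) : Int) := by
  induction l generalizing i with
  | nil => simp [pvFindNonZero]
  | cons c cs ih =>
    by_cases hc : c = '0'
    · subst hc
      have hcast : ((i : Int) + 1) = ((i + 1 : Nat) : Int) := by push_cast; ring
      simp only [pvFindNonZero, ne_eq, not_true_eq_false, if_false, hcast, ih]
      by_cases hall : cs.all (· == '0') <;> simp [hall] <;> omega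
    · simp [pvFindNonZero, hc, List.all_cons]

theorem pvFindZero_eq_neg_one_iff (l : List Char) (i : Nat) :
    pvFindZero l (i : Int) = -1 ↔ '0' ∉ l := by
  induction l generalizing i with
  | nil => simp [pvFindZero]
  | cons c cs ih =>
    by_cases hc : c = '0'
    · subst hc
      simp [pvFindZero]
    · have hcast : ((i : Int) + 1) = ((i + 1 : Nat) : Int) := by push_cast; ring
      simp only [pvFindZero, if_neg hc]
      rw [hcast, ih (i + 1)]
      have hc' : ¬ ('0' = c) := fun h => hc h.symm
      simp [List.mem_cons, hc']

theorem pvStrip_digits (m : Nat) :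
    Nat.digits 10 (pvStrip m) = (Nat.digits 10 m).dropWhile (· == 0) := by
  induction m using Nat.strong_induction_on with
  | _ m ih =>
    by_cases hm : m = 0
    · subst hm; rw [pvStrip]; simp
    · rw [Nat.digits_def' (by omega : (1:Nat) < 10) (Nat.pos_of_ne_zero hm)]
      by_cases hz : m % 10 = 0
      · rw [pvStrip, dif_pos ⟨hz, hm⟩,
          ih (m / 10) (Nat.div_lt_self (Nat.pos_of_ne_zero hm) (by omega))]
        simp [hz]
      · rw [pvStrip, dif_neg (by tauto)]
        rw [Nat.digits_def' (by omega : (1:Nat) < 10) (Nat.pos_of_ne_zero hm)]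
        simp [hz]

theorem pvHasZero_eq (m : Nat) : pvHasZero m = decide (0 ∈ Nat.digits 10 m) := by
  induction m using Nat.strong_induction_on with
  | _ m ih =>
    by_cases hm : 0 < m
    · rw [pvHasZero, dif_pos hm, Nat.digits_def' (by omega : (1:Nat) < 10) hm]
      by_cases hz : m % 10 = 0
      · simp [hz]
      · rw [if_neg hz, ih (m / 10) (Nat.div_lt_self hm (by omega))]
        have h0 : ¬ (0 = m % 10) := fun h => hz h.symm
        simp [List.mem_cons, h0]
    · have hm0 : m = 0 := by omega
      subst hm0; rw [pvHasZero]; simp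

theorem pvScan_eq (dg : List Nat) (tl : List Char) (h : Nat) (t : List Nat)
    (he : dg.dropWhile (· == 0) = h :: t) (hh : h ≠ 0) (htl : '0' ∉ tl) :
    pvScan (dg.map Nat.digitChar ++ tl) = decide (0 ∈ t) := by
  have hdg : dg = dg.takeWhile (· == 0) ++ h :: t := by
    conv_lhs => rw [← List.takeWhile_append_dropWhile (p := (· == 0)) (l := dg)]
    rw [he]
  have hch : Nat.digitChar h ≠ '0' := fun hc => hh ((digitChar_eq_zero_iff h).mp hc)
  have hchb : ((Nat.digitChar h == '0') = false) := beq_eq_false_iff_ne.mpr hch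
  set pre := dg.takeWhile (· == 0) with hpre
  -- every char of the mapped prefix is '0'
  have hpretake : List.takeWhile (· == '0') (pre.map Nat.digitChar) = pre.map Nat.digitChar := by
    rw [List.takeWhile_map, comp_digitChar_eq, hpre, List.takeWhile_idem]
  have hrev : dg.map Nat.digitChar ++ tl
      = (pre.map Nat.digitChar ++ [Nat.digitChar h]) ++ (t.map Nat.digitChar ++ tl) := by
    conv_lhs => rw [hdg]
    simp
  -- the full takeWhile and the all-test
  have htake : List.takeWhile (· == '0') (dg.map Nat.digitChar ++ tl) = pre.map Nat.digitChar := by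
    rw [hrev, List.append_assoc, List.takeWhile_append, if_pos (by rw [hpretake]),
      List.singleton_append, List.takeWhile_cons_of_neg (by simp [hchb]), List.append_nil]
  have hall : (dg.map Nat.digitChar ++ tl).all (· == '0') = false := by
    rw [List.all_eq_false]
    exact ⟨Nat.digitChar h, by rw [hrev]; simp, by simp [hchb]⟩
  -- evaluate the first loop
  have hfirst : pvFindNonZero (dg.map Nat.digitChar ++ tl) 0 = ((pre.length : Nat) : Int) := by
    have := pvFindNonZero_eq (dg.map Nat.digitChar ++ tl) 0
    simp only [Nat.cast_zero] at this
    rw [this, if_neg (by simp [hall]), htake]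
    simp
  unfold pvScan
  rw [hfirst, if_neg (by omega)]
  have hcast : ((pre.length : Nat) : Int) + 1 = ((pre.length + 1 : Nat) : Int) := by push_cast; ring
  rw [hcast, PySem.List.slice_from_natCast]
  have hdrop : List.drop (pre.length + 1) (dg.map Nat.digitChar ++ tl)
      = t.map Nat.digitChar ++ tl := by
    rw [hrev]
    have hlen : (pre.map Nat.digitChar ++ [Nat.digitChar h]).length = pre.length + 1 := by simp
    rw [← hlen, List.drop_left]
  rw [hdrop]
  show (if pvFindZero (List.map Nat.digitChar t ++ tl) 0 = -1 then false else true)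
      = decide (0 ∈ t)
  have hiff : pvFindZero (List.map Nat.digitChar t ++ tl) 0 = -1
      ↔ '0' ∉ (List.map Nat.digitChar t ++ tl) := by
    simpa using pvFindZero_eq_neg_one_iff (List.map Nat.digitChar t ++ tl) 0
  have hmem : ('0' ∈ List.map Nat.digitChar t ++ tl) ↔ 0 ∈ t := by
    simp only [List.mem_append, List.mem_map]
    constructor
    · rintro (⟨d, hd, hdc⟩ | hmt)
      · rw [(digitChar_eq_zero_iff d).mp hdc] at hd; exact hd
      · exact absurd hmt htl
    · intro h0; exact Or.inl ⟨0, h0, rfl⟩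
  by_cases h0 : 0 ∈ t
  · rw [if_neg (by rw [hiff]; simp [hmem, h0])]
    simp [h0]
  · rw [if_pos (by rw [hiff]; simp [hmem, h0])]
    simp [h0]

theorem main_eq (n : Int) : solution n = solution_alt n := by
  by_cases hn0 : n = 0
  · subst hn0
    have hA : solution 0 = false := by decide
    have hB : solution_alt 0 = false := by
      unfold solution_alt
      rw [show (0 : Int).natAbs = 0 from rfl, pvStrip]
      simp only [Nat.zero_mod, ne_eq, not_true_eq_false, and_false, dite_false]
      rw [pvHasZero]
      simp
    rw [hA, hB]
  · have hm : n.natAbs ≠ 0 := Int.natAbs_ne_zero.mpr hn0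
    set m := n.natAbs with hmdef
    set dg := Nat.digits 10 m with hdg
    have hdgne : dg ≠ [] := Nat.digits_ne_nil_iff_ne_zero.mpr hm
    have hend : ¬ (dg.dropWhile (· == 0) = []) := by
      rw [List.dropWhile_eq_nil_iff]
      intro hallz
      exact Nat.getLast_digit_ne_zero 10 hm
        (by simpa using hallz (dg.getLast hdgne) (List.getLast_mem hdgne))
    obtain ⟨h, t, he⟩ := List.exists_cons_of_ne_nil hend
    have hh : h ≠ 0 := by
      have hhd := List.head?_dropWhile_not (fun x => x == 0) dg
      rw [he] at hhd
      simpa using hhd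
    -- B's value
    have hB : solution_alt n = decide (0 ∈ t) := by
      unfold solution_alt
      rw [pvHasZero_eq, pvStrip_digits, ← hmdef, ← hdg, he]
      have hh' : (0 = h) ↔ False := ⟨fun q => hh q.symm, False.elim⟩
      simp [List.mem_cons, hh']
    -- A's value
    have hA1 : solution n = pvScan ((PySem.Int.toStr n).toList.reverse) := by
      unfold solution
      rw [PySem.Str.slice?_none_none_neg_one]
      simp
    rw [hA1, hB, PySem.Int.toList_toStr]
    by_cases hneg : n < 0
    · have hc : PySem.Int.toChars n = '-' :: Nat.toDigits 10 m := by
        simp [PySem.Int.toChars, hneg, hmdef]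
      rw [hc, toDigits_eq_digits m (Nat.pos_of_ne_zero hm), ← hdg]
      have : ('-' :: (dg.map Nat.digitChar).reverse).reverse
          = dg.map Nat.digitChar ++ ['-'] := by simp
      rw [this]
      exact pvScan_eq dg ['-'] h t he hh (by decide)
    · have htn : n.toNat = m := by omega
      have hc : PySem.Int.toChars n = Nat.toDigits 10 m := by
        simp [PySem.Int.toChars, hneg, htn]
      rw [hc, toDigits_eq_digits m (Nat.pos_of_ne_zero hm), ← hdg, List.reverse_reverse]
      have : dg.map Nat.digitChar = dg.map Nat.digitChar ++ [] := by simp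
      rw [this]
      exact pvScan_eq dg [] h t he hh (by simp)

-- ===== VERDICT (by name: the statement is the Claim_ definition above) =====
theorem solution_spec : Claim_equal_solution := by
  intro n _
  unfold Spec_solution
  exact main_eq n
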